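-- pv_equiv track=rewrite | github.com/Filipi565/Numeros-Loteria | utils.py | get_rights
-- ===== SOURCE A (Python) =====
-- from collections.abc import Iterable, Callable
--
-- def get_rights(results: Iterable[int], numbers: Iterable[int]):
--     lists = list[int]()
--     lists += results
--     lists += numbers
--
--     numbers_dict = dict[int, int]()
--
--     _get_repeated = lambda x: (numbers_dict[x] >= 2)
--
--     for number in lists:
--         if number not in numbers_dict:
--             numbers_dict[number] = 0
--
--         numbers_dict[number] += 1
--
--     return sum(map(_get_repeated, numbers_dict))
-- ===== SOURCE B (Python) =====
-- def get_rights(results, numbers):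
--     xs = sorted(list(results) + list(numbers))
--     total = 0
--     i = 0
--     n = len(xs)
--     while i < n:
--         j = i
--         while j < n and xs[j] == xs[i]:
--             j += 1
--         if j - i >= 2:
--             total += 1
--         i = j
--     return total
-- ===== Notes on version B (the rewrite author's own statement) =====
-- stated objective: alternative
-- what changed: Replaces A's hash-table frequency count plus a second summation pass over its keys with sort-then-scan: sort the concatenation and count maximal runs of equal adjacent elements whose length is at least 2.
import Mathlib
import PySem

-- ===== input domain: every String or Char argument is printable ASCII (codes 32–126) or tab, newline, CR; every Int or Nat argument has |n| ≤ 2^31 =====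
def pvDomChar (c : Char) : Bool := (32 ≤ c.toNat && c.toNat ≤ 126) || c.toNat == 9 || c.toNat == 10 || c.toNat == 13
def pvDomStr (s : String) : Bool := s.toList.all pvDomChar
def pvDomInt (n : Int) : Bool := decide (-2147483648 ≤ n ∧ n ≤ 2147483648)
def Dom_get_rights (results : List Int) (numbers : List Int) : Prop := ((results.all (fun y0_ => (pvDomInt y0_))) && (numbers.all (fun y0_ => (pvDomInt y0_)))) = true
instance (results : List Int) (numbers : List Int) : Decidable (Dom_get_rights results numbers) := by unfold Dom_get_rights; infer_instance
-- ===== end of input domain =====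

-- B replaces A's hash-table frequency count plus a second summation pass over its keys
-- with sort-then-scan: sort the concatenation and count maximal runs of equal adjacent
-- elements of length >= 2 (objective: alternative).

-- ===== PORT A =====
def get_rights (results : List Int) (numbers : List Int) : Int :=
  let lists := results ++ numbers
  let numbers_dict : PySem.Dict Int Int :=
    lists.foldl (fun d number =>
      let d := if d.contains number then d else d.insert number 0
      d.insert number (d.getD number 0 + 1)) PySem.Dict.empty
  ((numbers_dict.keys).map (fun x =>
      if 2 ≤ numbers_dict.getD x 0 then (1 : Int) else 0)).sum

-- ===== PORT B =====
-- inner while loop of Source B: advance over the elements equal to the run head,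
-- returning (number of equal elements consumed, rest of the list)
def pvSkipRun (a : Int) : List Int → Nat × List Int
  | [] => (0, [])
  | b :: t => if b = a then let p := pvSkipRun a t; (p.1 + 1, p.2) else (0, b :: t)

theorem pvSkipRun_length (a : Int) : ∀ t : List Int, (pvSkipRun a t).2.length ≤ t.length := by
  intro t
  induction t with
  | nil => simp [pvSkipRun]
  | cons b t ih =>
    by_cases h : b = a
    · simp only [pvSkipRun, if_pos h]
      exact Nat.le_succ_of_le ih
    · simp [pvSkipRun, if_neg h]

-- outer while loop of Source B: one step per maximal run, adding 1 when the run length j-i ≥ 2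
def pvRunScan : List Int → Int
  | [] => 0
  | a :: t =>
    let p := pvSkipRun a t
    (if 2 ≤ 1 + p.1 then (1 : Int) else 0) + pvRunScan p.2
termination_by s => s.length
decreasing_by simpa using Nat.lt_succ_of_le (pvSkipRun_length a t)

def get_rights_alt (results : List Int) (numbers : List Int) : Int :=
  let xs := PySem.List.sorted (results ++ numbers) (fun x => x) false
  pvRunScan xs

-- ===== PRECONDITION & SPEC =====
def Spec_get_rights (results : List Int) (numbers : List Int) (out : Int) : Prop := out = get_rights_alt results numbers
instance (results : List Int) (numbers : List Int) (out : Int) : Decidable (Spec_get_rights results numbers out) := by unfold Spec_get_rights; infer_instance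

-- ===== CLAIM (what is proved, stated in full; the proofs are below) =====
def Claim_equal_get_rights : Prop := ∀ (results : List Int) (numbers : List Int), Dom_get_rights results numbers → Spec_get_rights results numbers (get_rights results numbers)

-- ===== LEMMAS AND PROOFS =====

-- A's loop body (default the key to 0, then add 1) is the standard counting insert.
theorem stepA_eq (d : PySem.Dict Int Int) (n : Int) :
    (if d.contains n then d else d.insert n 0).insert n
      ((if d.contains n then d else d.insert n 0).getD n 0 + 1)
    = d.insert n (d.getD n 0 + 1) := by
  by_cases h : d.contains n = true
  · simp [h]
  · have hc : d.contains n = false := by simpa using h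
    rw [if_neg h, PySem.Dict.getD_insert_self, PySem.Dict.insert_insert_self,
      PySem.Dict.getD_of_not_contains d 0 hc]

-- pvSkipRun on a sorted list peels off exactly the leading run of the head element.
theorem pvSkipRun_struct (a : Int) : ∀ t : List Int, List.Sorted (· ≤ ·) (a :: t) →
    t = List.replicate (pvSkipRun a t).1 a ++ (pvSkipRun a t).2 ∧ a ∉ (pvSkipRun a t).2 := by
  intro t
  induction t with
  | nil => simp [pvSkipRun]
  | cons b t ih =>
    intro hs
    by_cases h : b = a
    · subst h
      have hs' : List.Sorted (· ≤ ·) (b :: t) := by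
        have hsub : (b :: t).Sublist (b :: b :: t) := by
          exact List.Sublist.cons₂ b (List.sublist_cons_self b t)
        exact List.Pairwise.sublist hsub hs
      obtain ⟨h1, h2⟩ := ih hs'
      refine ⟨?_, ?_⟩
      · simp only [pvSkipRun]
        calc b :: t = b :: (List.replicate (pvSkipRun b t).1 b ++ (pvSkipRun b t).2) := by rw [← h1]
          _ = List.replicate ((pvSkipRun b t).1 + 1) b ++ (pvSkipRun b t).2 := by
              rw [List.replicate_succ]; simp
      · simpa only [pvSkipRun, if_pos rfl] using h2
    · refine ⟨by simp [pvSkipRun, if_neg h], ?_⟩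
      simp only [pvSkipRun, if_neg h]
      intro hmem
      rcases List.mem_cons.mp hmem with h' | h'
      · exact h h'.symm
      · have hab : a ≤ b := (List.sorted_cons.mp hs).1 b (List.mem_cons_self)
        have hba : b ≤ a := (List.sorted_cons.mp ((List.sorted_cons.mp hs).2)).1 a h'
        exact h (le_antisymm hba hab)

-- Main B-side lemma: on a sorted list, the run scan counts the distinct elements
-- occurring at least twice (ds is any duplicate-free enumeration of the elements).
theorem pvRunScan_eq : ∀ (n : Nat) (s ds : List Int), s.length ≤ n →
    List.Sorted (· ≤ ·) s → ds.Nodup → (∀ x, x ∈ ds ↔ x ∈ s) →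
    pvRunScan s = ((ds.countP (fun x => decide (2 ≤ (s.count x : Int)))) : Int) := by
  intro n
  induction n with
  | zero =>
    intro s ds hlen _ _ hmem
    have hs : s = [] := List.eq_nil_of_length_eq_zero (Nat.le_zero.mp hlen)
    subst hs
    have hds : ds = [] := List.eq_nil_iff_forall_not_mem.mpr (fun x hx => by simpa using (hmem x).mp hx)
    subst hds
    simp [pvRunScan]
  | succ n ih =>
    intro s ds hlen hsort hnd hmem
    match s, hlen, hsort, hmem with
    | [], _, _, hmem =>
      have hds : ds = [] := List.eq_nil_iff_forall_not_mem.mpr (fun x hx => by simpa using (hmem x).mp hx)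
      subst hds
      simp [pvRunScan]
    | a :: t, hlen, hsort, hmem =>
      obtain ⟨ht, hanr⟩ := pvSkipRun_struct a t hsort
      set k := (pvSkipRun a t).1 with hk
      set r := (pvSkipRun a t).2 with hr
      -- structure facts
      have hs_eq : a :: t = List.replicate (k + 1) a ++ r := by
        rw [List.replicate_succ]; simpa using ht
      have hcount_a : (a :: t).count a = k + 1 := by
        rw [hs_eq, List.count_append, List.count_replicate_self,
          List.count_eq_zero.mpr hanr]
      have hcount_ne : ∀ x, x ≠ a → (a :: t).count x = r.count x := by
        intro x hx
        rw [hs_eq, List.count_append, List.count_replicate]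
        simp [Ne.symm hx]
      have hmem_s : ∀ x, x ∈ (a :: t) ↔ (x = a ∨ x ∈ r) := by
        intro x
        rw [hs_eq, List.mem_append, List.mem_replicate]
        constructor
        · rintro (⟨_, h⟩ | h)
          · exact Or.inl h
          · exact Or.inr h
        · rintro (h | h)
          · exact Or.inl ⟨Nat.succ_ne_zero k, h⟩
          · exact Or.inr h
      have hsort_r : List.Sorted (· ≤ ·) r := by
        have hsub : r.Sublist (a :: t) := by
          rw [hs_eq]; exact (List.sublist_append_right _ _)
        exact List.Pairwise.sublist hsub hsort
      -- decompose ds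
      have hads : a ∈ ds := (hmem a).mpr (List.mem_cons_self)
      have hperm : ds.Perm (a :: ds.erase a) := List.perm_cons_erase hads
      have hnd' : (ds.erase a).Nodup := List.Nodup.erase a hnd
      have hmem' : ∀ x, x ∈ ds.erase a ↔ x ∈ r := by
        intro x
        rw [List.Nodup.mem_erase_iff hnd]
        constructor
        · rintro ⟨hxa, hxd⟩
          rcases (hmem_s x).mp ((hmem x).mp hxd) with h | h
          · exact absurd h hxa
          · exact h
        · intro hx
          refine ⟨fun h => hanr (h ▸ hx), (hmem x).mpr ((hmem_s x).mpr (Or.inr hx))⟩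
      have hlen' : r.length ≤ n := by
        have h1 : r.length ≤ t.length := pvSkipRun_length a t
        simp only [List.length_cons] at hlen
        omega
      have hrec := ih r (ds.erase a) hlen' hsort_r hnd' hmem'
      -- countP: switch counts from s to r on the erased list
      have hcongr : (ds.erase a).countP (fun x => decide (2 ≤ ((a :: t).count x : Int)))
          = (ds.erase a).countP (fun x => decide (2 ≤ (r.count x : Int))) := by
        apply List.countP_congr
        intro x hx
        have hxa : x ≠ a := ((List.Nodup.mem_erase_iff hnd).mp hx).1
        rw [hcount_ne x hxa]
      have hcp : ds.countP (fun x => decide (2 ≤ ((a :: t).count x : Int)))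
          = (if 2 ≤ ((k : Int) + 1) then 1 else 0)
            + (ds.erase a).countP (fun x => decide (2 ≤ (r.count x : Int))) := by
        rw [hperm.countP_eq, List.countP_cons, hcongr, hcount_a]
        push_cast
        by_cases h2 : 2 ≤ ((k : Int) + 1)
        · rw [if_pos h2, if_pos (decide_eq_true h2)]
          omega
        · rw [if_neg h2, if_neg (by simpa using h2)]
          omega
      -- unfold one step of pvRunScan
      have hstep : pvRunScan (a :: t)
          = (if 2 ≤ 1 + k then (1 : Int) else 0) + pvRunScan r := by
        rw [pvRunScan]
      rw [hstep, hrec, hcp]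
      have hiff : (2 ≤ 1 + k) ↔ (2 ≤ ((k : Int) + 1)) := by omega
      by_cases h2 : 2 ≤ 1 + k
      · rw [if_pos h2, if_pos (hiff.mp h2)]; push_cast; ring
      · rw [if_neg h2, if_neg (fun h => h2 (hiff.mpr h))]; push_cast; ring

-- ===== VERDICT (by name: the statement is the Claim_ definition above) =====
theorem get_rights_spec : Claim_equal_get_rights := by
  intro results numbers _
  unfold Spec_get_rights get_rights get_rights_alt
  dsimp only
  set L := results ++ numbers with hL
  -- A side: the loop body is the counting insert, so the dict is Counter(L)
  have hstep : (fun (d : PySem.Dict Int Int) (number : Int) =>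
      (if d.contains number then d else d.insert number 0).insert number
        ((if d.contains number then d else d.insert number 0).getD number 0 + 1))
      = fun d x => d.insert x (d.getD x 0 + 1) :=
    funext fun d => funext fun n => stepA_eq d n
  rw [hstep, PySem.Dict.foldl_insert_getD_add_one_eq_counter, PySem.Dict.keys_counter]
  have hsum : ((PySem.Set.ofList L).map (fun x =>
      if 2 ≤ (PySem.Dict.counter L).getD x 0 then (1 : Int) else 0)).sum
      = ((PySem.Set.ofList L).map (fun x =>
      if 2 ≤ ((L.count x : Int)) then (1 : Int) else 0)).sum := by
    simp only [PySem.Dict.getD_counter]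
  rw [hsum, PySem.List.sum_map_ite_one_zero' (fun x => 2 ≤ ((L.count x : Int)))]
  -- B side: the sorted list is a permutation of L with the same counts and members
  set s := PySem.List.sorted L (fun x => x) false with hs
  have hperm : s.Perm L := PySem.List.sorted_perm L (fun x => x) false
  have hsort : List.Sorted (· ≤ ·) s := by
    have := PySem.List.sorted_pairwise (xs := L) (key := fun x => x)
    simpa [List.Sorted, hs] using this
  have hcnt : ∀ x, L.count x = s.count x := fun x => (hperm.count_eq x).symm
  have hcongr : (PySem.Set.ofList L).countP (fun x => decide (2 ≤ ((L.count x : Int))))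
      = (PySem.Set.ofList L).countP (fun x => decide (2 ≤ ((s.count x : Int)))) := by
    apply List.countP_congr
    intro x _
    rw [hcnt x]
  rw [hcongr]
  exact (pvRunScan_eq s.length s (PySem.Set.ofList L) le_rfl hsort
    (PySem.Set.nodup_ofList L)
    (fun x => by rw [PySem.Set.mem_ofList]; exact (hperm.mem_iff).symm)).symm
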